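-- pv_equiv track=rewrite | github.com/sitgang/Backtesting-Stra-Chan | Chan_Functions.py | is_lowhigh_descending
-- ===== SOURCE A (Python) =====
-- def is_lowhigh_descending(lhs):
--     """用于判断一组高低价是否连续下降"""
--     plh = lhs[0]
--     for i in range(1,len(lhs)):
--         clh = lhs[i]
--         if clh[0] < plh[0] and clh[1] < plh[1]:
--             plh = lhs[i]
--         else:
--             return False
--
--     return True
-- ===== SOURCE B (Python) =====
-- def is_lowhigh_descending(lhs):
--     """用于判断一组高低价是否连续下降"""
--     lows = [p[0] for p in lhs]
--     highs = [p[1] for p in lhs]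
--     # A column is strictly descending iff it equals the descending sort of
--     # its distinct values (duplicates or any disorder break the equality).
--     return lows == sorted(set(lows), reverse=True) and \
--            highs == sorted(set(highs), reverse=True)
-- ===== Notes on version B (the rewrite author's own statement) =====
-- stated objective: alternative
-- what changed: B replaces A's stateful previous-pair loop with a sort-based characterisation: each column (lows, highs) is strictly descending iff it equals the descending sort of its distinct values, so B builds set(column) and compares against sorted(..., reverse=True) instead of scanning adjacent pairs.
import Mathlib
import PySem

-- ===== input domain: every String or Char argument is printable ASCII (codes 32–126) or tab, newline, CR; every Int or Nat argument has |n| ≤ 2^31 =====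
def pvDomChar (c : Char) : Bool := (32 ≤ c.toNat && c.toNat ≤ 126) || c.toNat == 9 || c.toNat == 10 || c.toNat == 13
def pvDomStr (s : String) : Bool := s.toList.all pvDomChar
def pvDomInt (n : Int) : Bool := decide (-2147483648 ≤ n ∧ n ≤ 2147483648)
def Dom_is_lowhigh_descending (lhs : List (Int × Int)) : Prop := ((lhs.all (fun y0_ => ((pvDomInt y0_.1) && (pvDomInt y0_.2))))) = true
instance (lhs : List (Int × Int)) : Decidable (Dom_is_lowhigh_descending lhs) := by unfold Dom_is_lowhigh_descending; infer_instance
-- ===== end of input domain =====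

-- B checks each column via the sort-based identity "strictly descending iff equal to the descending sort of its distinct values" (alternative algorithm); A raises IndexError on [], B returns True there.


-- ===== PORT A =====
-- A's loop over range(1, len lhs): carries plh, returns False on the first non-descending step.
def aLoop (plh : Int × Int) (rest : List (Int × Int)) : Bool :=
  match rest with
  | [] => true
  | clh :: t => if clh.1 < plh.1 ∧ clh.2 < plh.2 then aLoop clh t else false

-- 'plh = lhs[0]' raises IndexError on []; that input is excluded by Pre_ (the [] branch value is never claimed).
def is_lowhigh_descending (lhs : List (Int × Int)) : Bool :=
  match lhs with
  | [] => false
  | p :: t => aLoop p t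

-- ===== PORT B =====
-- col == sorted(set(col), reverse=True)
def colSortedDesc (xs : List Int) : Bool :=
  xs == PySem.List.sorted (PySem.Set.ofList xs) (fun x => x) true

def is_lowhigh_descending_alt (lhs : List (Int × Int)) : Bool :=
  colSortedDesc (lhs.map Prod.fst) && colSortedDesc (lhs.map Prod.snd)

-- ===== PRECONDITION & SPEC =====
-- Pre_ excludes only the empty list, on which A raises IndexError at lhs[0].
def Pre_is_lowhigh_descending (lhs : List (Int × Int)) : Prop := lhs ≠ []
instance (lhs : List (Int × Int)) : Decidable (Pre_is_lowhigh_descending lhs) := by unfold Pre_is_lowhigh_descending; infer_instance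
def pvWitness_is_lowhigh_descending : (List (Int × Int)) := [(2, 3), (1, 2)]

def Spec_is_lowhigh_descending (lhs : List (Int × Int)) (out : Bool) : Prop := out = is_lowhigh_descending_alt lhs
instance (lhs : List (Int × Int)) (out : Bool) : Decidable (Spec_is_lowhigh_descending lhs out) := by unfold Spec_is_lowhigh_descending; infer_instance

-- ===== CLAIM (what is proved, stated in full; the proofs are below) =====
def Claim_equal_is_lowhigh_descending : Prop := ∀ (lhs : List (Int × Int)), Dom_is_lowhigh_descending lhs → Pre_is_lowhigh_descending lhs → Spec_is_lowhigh_descending lhs (is_lowhigh_descending lhs)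

-- ===== LEMMAS AND PROOFS =====
-- Pairwise-(flip <) on a cons-cons reduces to the adjacent comparison (uses transitivity of <).
theorem pgt_cons_cons (a b : Int) (l : List Int) :
    (a :: b :: l).Pairwise (fun x y => y < x) ↔ b < a ∧ (b :: l).Pairwise (fun x y => y < x) := by
  constructor
  · intro h
    rcases List.pairwise_cons.mp h with ⟨hall, ht⟩
    exact ⟨hall b (List.mem_cons_self), ht⟩
  · rintro ⟨hba, ht⟩
    refine List.pairwise_cons.mpr ⟨?_, ht⟩
    intro x hx
    rcases List.mem_cons.mp hx with rfl | hx
    · exact hba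
    · exact lt_trans (List.rel_of_pairwise_cons ht hx) hba

-- A's loop says: both projected columns are pairwise strictly descending.
theorem aLoop_iff (t : List (Int × Int)) : ∀ p : Int × Int,
    aLoop p t = true ↔
      ((p :: t).map Prod.fst).Pairwise (fun x y => y < x) ∧
      ((p :: t).map Prod.snd).Pairwise (fun x y => y < x) := by
  induction t with
  | nil => intro p; simp [aLoop]
  | cons c t ih =>
    intro p
    simp only [aLoop, List.map_cons]
    rw [pgt_cons_cons, pgt_cons_cons]
    by_cases h : c.1 < p.1 ∧ c.2 < p.2
    · simp only [if_pos h]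
      rw [ih c]
      simp only [List.map_cons]
      tauto
    · simp only [if_neg h]
      constructor
      · intro hf; exact absurd hf (by simp)
      · rintro ⟨⟨h1, _⟩, ⟨h2, _⟩⟩; exact absurd ⟨h1, h2⟩ h

-- B's column test says: the column is pairwise strictly descending.
theorem colSortedDesc_iff (xs : List Int) :
    colSortedDesc xs = true ↔ xs.Pairwise (fun x y => y < x) := by
  unfold colSortedDesc
  rw [beq_iff_eq]
  constructor
  · intro h
    rw [h]
    have hnd : (PySem.List.sorted (PySem.Set.ofList xs) (fun x => x) true).Nodup :=
      (PySem.List.sorted_perm (PySem.Set.ofList xs) (fun x => x) true).symm.nodup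
        (PySem.Set.nodup_ofList xs)
    have hle := PySem.List.sorted_pairwise_rev (PySem.Set.ofList xs) (fun x => x)
    exact (hnd.and hle).imp (fun hab => lt_of_le_of_ne hab.2 (Ne.symm hab.1))
  · intro h
    have hnd : xs.Nodup := h.imp (fun hab => ne_of_gt hab)
    have hof : PySem.Set.ofList xs = xs := by simp [pysem, hnd]
    rw [hof]
    exact (PySem.List.sorted_rev_eq_of_perm_of_pairwise_gt xs xs (fun x => x)
      (List.Perm.refl xs) h).symm

-- ===== VERDICT (by name: the statement is the Claim_ definition above) =====
theorem is_lowhigh_descending_spec : Claim_equal_is_lowhigh_descending := by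
  intro lhs _ hpre
  unfold Spec_is_lowhigh_descending is_lowhigh_descending is_lowhigh_descending_alt
  match lhs with
  | [] => exact absurd rfl hpre
  | p :: t =>
    rw [Bool.eq_iff_iff, Bool.and_eq_true, colSortedDesc_iff, colSortedDesc_iff]
    exact aLoop_iff t p
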